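-- pv_equiv track=rewrite | github.com/Apollo-Replica/DSKY | firmware/tools/osccal_reader.py | best_perfect_span
-- ===== SOURCE A (Python) =====
-- from typing import Dict, List, Optional, Tuple
--
-- Score = Tuple[int, int]  # (total correct, longest run)
--
-- def best_perfect_span(scores: Dict[int, List[Score]], burst_len: int) -> Optional[Tuple[int, int, int]]:
--     # Find the longest contiguous span of CAL values that had at least one perfect frame.
--     perfect_cals = sorted(cal for cal, cal_scores in scores.items() if any(s[0] == burst_len for s in cal_scores))
--     if not perfect_cals:
--         return None
--     best_span = (perfect_cals[0], perfect_cals[0])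
--     cur_start = cur_end = perfect_cals[0]
--     for cal in perfect_cals[1:]:
--         if cal == cur_end + 1:
--             cur_end = cal
--         else:
--             if (cur_end - cur_start) > (best_span[1] - best_span[0]):
--                 best_span = (cur_start, cur_end)
--             cur_start = cur_end = cal
--     if (cur_end - cur_start) > (best_span[1] - best_span[0]):
--         best_span = (cur_start, cur_end)
--     mid = (best_span[0] + best_span[1]) // 2
--     return best_span[0], best_span[1], mid
-- ===== SOURCE B (Python) =====
-- def best_perfect_span(scores, burst_len):
--     # Set of CAL keys with at least one perfect frame; walk runs from their starts.
--     S = {cal for cal, cal_scores in scores.items() if any(s[0] == burst_len for s in cal_scores)}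
--     best = None
--     for c in S:
--         if c - 1 not in S:
--             e = c
--             while e + 1 in S:
--                 e += 1
--             if best is None or (e - c > best[1] - best[0]) or (e - c == best[1] - best[0] and c < best[0]):
--                 best = (c, e)
--     if best is None:
--         return None
--     return best[0], best[1], (best[0] + best[1]) // 2
-- ===== Notes on version B (the rewrite author's own statement) =====
-- stated objective: alternative
-- what changed: A sorts the perfect CAL keys and tracks best/current run in one fused fold; B builds a set of perfect CALs, walks each run from its start (c in S with c-1 not in S), and keeps the longest run with the earliest start on ties - no sorting.
import Mathlib
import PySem

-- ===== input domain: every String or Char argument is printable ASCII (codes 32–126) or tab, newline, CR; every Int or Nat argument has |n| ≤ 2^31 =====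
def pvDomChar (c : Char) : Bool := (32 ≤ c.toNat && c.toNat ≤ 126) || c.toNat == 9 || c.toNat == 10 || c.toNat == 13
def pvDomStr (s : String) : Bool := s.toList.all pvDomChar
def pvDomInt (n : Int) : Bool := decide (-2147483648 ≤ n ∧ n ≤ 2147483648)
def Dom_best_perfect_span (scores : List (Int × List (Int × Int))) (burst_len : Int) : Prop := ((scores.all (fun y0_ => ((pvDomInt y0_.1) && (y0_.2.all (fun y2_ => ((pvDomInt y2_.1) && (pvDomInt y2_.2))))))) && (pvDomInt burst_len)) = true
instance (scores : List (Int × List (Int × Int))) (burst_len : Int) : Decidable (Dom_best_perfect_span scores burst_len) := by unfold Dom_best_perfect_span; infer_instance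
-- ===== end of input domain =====

-- B replaces A's sort + fused best/current-run fold by a set of perfect CALs whose
-- runs are walked from their starts; same result, no sorting (objective: alternative).

-- ===== PORT A =====
-- A's loop body and the final best-span update, kept as named helpers.
def bps_astep (acc : (Int × Int) × Int × Int) (cal : Int) : (Int × Int) × Int × Int :=
  if cal = acc.2.2 + 1 then (acc.1, acc.2.1, cal)
  else if acc.2.2 - acc.2.1 > acc.1.2 - acc.1.1 then ((acc.2.1, acc.2.2), cal, cal)
  else (acc.1, cal, cal)

def bps_afinal (st : (Int × Int) × Int × Int) : Int × Int :=
  if st.2.2 - st.2.1 > st.1.2 - st.1.1 then (st.2.1, st.2.2) else st.1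

def best_perfect_span (scores : List (Int × List (Int × Int))) (burst_len : Int) : Option (Int × Int × Int) :=
  let perfect_cals := PySem.List.sorted
      (((PySem.Dict.ofList scores).items.filter (fun p => p.2.any (fun s => s.1 == burst_len))).map (fun p => p.1))
      (fun x => x) false
  match perfect_cals with
  | [] => none
  | p0 :: rest =>
      let st := rest.foldl bps_astep ((p0, p0), p0, p0)
      let best := bps_afinal st
      some (best.1, best.2, PySem.Int.floordiv (best.1 + best.2) 2)

-- ===== PORT B =====
-- B's `while e + 1 in S` walk; fuel S.length suffices (proved in bps_walk_spec below).
def bps_walk (S : List Int) : Int → Nat → Int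
  | e, 0 => e
  | e, n+1 => if (e + 1) ∈ S then bps_walk S (e + 1) n else e

-- B's `best is None or …` update condition.
def bps_better (c e : Int) : Option (Int × Int) → Bool
  | none => true
  | some (bs, be) => decide (e - c > be - bs) || (decide (e - c = be - bs) && decide (c < bs))

-- B's loop body over the set elements.
def bps_bstep (S : List Int) (best : Option (Int × Int)) (c : Int) : Option (Int × Int) :=
  if (c - 1) ∈ S then best
  else
    let e := bps_walk S c S.length
    if bps_better c e best then some (c, e) else best

def best_perfect_span_alt (scores : List (Int × List (Int × Int))) (burst_len : Int) : Option (Int × Int × Int) :=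
  let S : PySem.Set Int := PySem.Set.ofList
      (((PySem.Dict.ofList scores).items.filter (fun p => p.2.any (fun s => s.1 == burst_len))).map (fun p => p.1))
  let best := S.foldl (bps_bstep S) none
  match best with
  | none => none
  | some (bs, be) => some (bs, be, PySem.Int.floordiv (bs + be) 2)

-- ===== PRECONDITION & SPEC =====
def Spec_best_perfect_span (scores : List (Int × List (Int × Int))) (burst_len : Int) (out : Option (Int × Int × Int)) : Prop := out = best_perfect_span_alt scores burst_len
instance (scores : List (Int × List (Int × Int))) (burst_len : Int) (out : Option (Int × Int × Int)) : Decidable (Spec_best_perfect_span scores burst_len out) := by unfold Spec_best_perfect_span; infer_instance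

-- ===== CLAIM (what is proved, stated in full; the proofs are below) =====
def Claim_equal_best_perfect_span : Prop := ∀ (scores : List (Int × List (Int × Int))) (burst_len : Int), Dom_best_perfect_span scores burst_len → Spec_best_perfect_span scores burst_len (best_perfect_span scores burst_len)

-- ===== LEMMAS AND PROOFS =====

-- (s, e) is a maximal contiguous run of the set P.
def bps_IsRun (P : Int → Prop) (s e : Int) : Prop :=
  s ≤ e ∧ (∀ m, s ≤ m → m ≤ e → P m) ∧ ¬ P (s - 1) ∧ ¬ P (e + 1)

-- (s, e) is the longest run of P, earliest start on ties.
def bps_BestRun (P : Int → Prop) (s e : Int) : Prop :=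
  bps_IsRun P s e ∧ ∀ s' e', bps_IsRun P s' e' → (e' - s' < e - s ∨ (e' - s' = e - s ∧ s ≤ s'))

lemma bps_run_end_unique {P : Int → Prop} {s e1 e2 : Int}
    (h1 : bps_IsRun P s e1) (h2 : bps_IsRun P s e2) : e1 = e2 := by
  by_contra h
  rcases lt_or_gt_of_ne h with h' | h'
  · exact h1.2.2.2 (h2.2.1 (e1 + 1) (by have := h1.1; omega) (by omega))
  · exact h2.2.2.2 (h1.2.1 (e2 + 1) (by have := h2.1; omega) (by omega))

lemma bps_run_block {P : Int → Prop} {cs ce s e : Int}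
    (hblk : ∀ m, cs ≤ m → m ≤ ce → P m) (hl : ¬ P (cs - 1)) (hr : ¬ P (ce + 1))
    (hrun : bps_IsRun P s e) (h1 : cs ≤ e) (h2 : e ≤ ce) : s = cs ∧ e = ce := by
  obtain ⟨hse, hb, hsl, hsr⟩ := hrun
  have hcse : cs ≤ ce := le_trans h1 h2
  have he : e = ce := by
    by_contra h
    exact hsr (hblk (e + 1) (by omega) (by omega))
  subst he
  refine ⟨?_, rfl⟩
  by_contra h
  rcases lt_or_gt_of_ne h with h' | h'
  · exact hl (hb (cs - 1) (by omega) (by omega))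
  · exact hsl (hblk (s - 1) (by omega) (by omega))

lemma bps_BestRun_unique {P : Int → Prop} {s e s' e' : Int}
    (h1 : bps_BestRun P s e) (h2 : bps_BestRun P s' e') : s = s' ∧ e = e' := by
  have a1 := h1.2 s' e' h2.1
  have a2 := h2.2 s e h1.1
  have hs : s = s' := by omega
  subst hs
  exact ⟨rfl, bps_run_end_unique h1.1 h2.1⟩

lemma bps_IsRun_congr {P Q : Int → Prop} (h : ∀ m, P m ↔ Q m) {s e : Int} :
    bps_IsRun P s e ↔ bps_IsRun Q s e := by
  unfold bps_IsRun
  constructor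
  · rintro ⟨a, b, c, d⟩
    exact ⟨a, fun m h1 h2 => (h m).mp (b m h1 h2), fun hx => c ((h _).mpr hx), fun hx => d ((h _).mpr hx)⟩
  · rintro ⟨a, b, c, d⟩
    exact ⟨a, fun m h1 h2 => (h m).mpr (b m h1 h2), fun hx => c ((h _).mp hx), fun hx => d ((h _).mp hx)⟩

lemma bps_BestRun_congr {P Q : Int → Prop} (h : ∀ m, P m ↔ Q m) {s e : Int} :
    bps_BestRun P s e ↔ bps_BestRun Q s e := by
  unfold bps_BestRun
  constructor <;> rintro ⟨a, b⟩
  · exact ⟨(bps_IsRun_congr h).mp a, fun s' e' hr => b s' e' ((bps_IsRun_congr h).mpr hr)⟩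
  · exact ⟨(bps_IsRun_congr h).mpr a, fun s' e' hr => b s' e' ((bps_IsRun_congr h).mp hr)⟩

-- ---- B side: the walk finds the end of the run, the fold picks the best run ----

lemma bps_countP_lt {S : List Int} {c : Int} (hc : c ∈ S) :
    S.countP (fun m => decide (c + 1 ≤ m)) < S.countP (fun m => decide (c ≤ m)) := by
  induction S with
  | nil => cases hc
  | cons x t ih =>
    have hmono : t.countP (fun m => decide (c + 1 ≤ m)) ≤ t.countP (fun m => decide (c ≤ m)) := by
      apply List.countP_mono_left
      intro a _ ha
      simp only [decide_eq_true_eq] at ha ⊢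
      omega
    simp only [List.countP_cons, decide_eq_true_eq]
    rcases List.mem_cons.1 hc with h | h
    · rw [if_pos (by omega : c ≤ x), if_neg (by omega : ¬ c + 1 ≤ x)]
      omega
    · have := ih h
      by_cases h1 : c + 1 ≤ x
      · rw [if_pos h1, if_pos (by omega : c ≤ x)]
        omega
      · rw [if_neg h1]
        by_cases h2 : c ≤ x
        · rw [if_pos h2]
          omega
        · rw [if_neg h2]
          omega

lemma bps_walk_spec : ∀ (f : Nat) (S : List Int) (c : Int), c ∈ S →
    S.countP (fun m => decide (c ≤ m)) ≤ f →
    c ≤ bps_walk S c f ∧ (∀ m, c ≤ m → m ≤ bps_walk S c f → m ∈ S) ∧ (bps_walk S c f + 1) ∉ S := by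
  intro f
  induction f with
  | zero =>
    intro S c hc hb
    exfalso
    have : 0 < S.countP (fun m => decide (c ≤ m)) := List.countP_pos_iff.2 ⟨c, hc, by simp⟩
    omega
  | succ n ih =>
    intro S c hc hb
    by_cases h : (c + 1) ∈ S
    · rw [bps_walk, if_pos h]
      have hlt := bps_countP_lt (S := S) (c := c) hc
      have hrec := ih S (c + 1) h (by omega)
      refine ⟨by have := hrec.1; omega, ?_, hrec.2.2⟩
      intro m h1 h2
      rcases eq_or_lt_of_le h1 with rfl | h1'
      · exact hc
      · exact hrec.2.1 m (by omega) h2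
    · rw [bps_walk, if_neg h]
      refine ⟨le_refl c, ?_, h⟩
      intro m h1 h2
      have hmc : m = c := le_antisymm h2 h1
      subst hmc
      exact hc

-- result so far is a run (or none)
def bps_optrun (S : List Int) : Option (Int × Int) → Prop
  | none => True
  | some (c, e) => bps_IsRun (· ∈ S) c e

-- "at least as good" order on candidate spans
def bps_ge : Option (Int × Int) → Option (Int × Int) → Prop
  | _, none => True
  | none, some _ => False
  | some a, some b => b.2 - b.1 < a.2 - a.1 ∨ (b.2 - b.1 = a.2 - a.1 ∧ a.1 ≤ b.1)

lemma bps_ge_refl (a : Option (Int × Int)) : bps_ge a a := by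
  cases a with
  | none => trivial
  | some p => exact Or.inr ⟨rfl, le_refl _⟩

lemma bps_ge_trans {a b c : Option (Int × Int)} (h1 : bps_ge a b) (h2 : bps_ge b c) : bps_ge a c := by
  cases a <;> cases b <;> cases c <;> simp [bps_ge] at *
  omega

lemma bps_bstep_spec (S : List Int) (acc : Option (Int × Int)) (c : Int)
    (hc : c ∈ S) (hacc : bps_optrun S acc) :
    bps_optrun S (bps_bstep S acc c) ∧ bps_ge (bps_bstep S acc c) acc ∧
    (∀ e, bps_IsRun (· ∈ S) c e → bps_ge (bps_bstep S acc c) (some (c, e))) := by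
  by_cases hm : (c - 1) ∈ S
  · simp only [bps_bstep, if_pos hm]
    exact ⟨hacc, bps_ge_refl acc, fun e hr => absurd hm hr.2.2.1⟩
  · have hw := bps_walk_spec S.length S c hc (List.countP_le_length)
    have hrun : bps_IsRun (· ∈ S) c (bps_walk S c S.length) := ⟨hw.1, hw.2.1, hm, hw.2.2⟩
    simp only [bps_bstep, if_neg hm]
    by_cases hb : bps_better c (bps_walk S c S.length) acc = true
    · rw [if_pos hb]
      refine ⟨hrun, ?_, ?_⟩
      · cases acc with
        | none => trivial
        | some p =>
          obtain ⟨bs, be⟩ := p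
          simp only [bps_better, decide_eq_true_eq, Bool.or_eq_true, Bool.and_eq_true] at hb
          rcases hb with h | ⟨h1, h2⟩
          · exact Or.inl (by omega)
          · exact Or.inr ⟨by omega, by omega⟩
      · intro e hre
        have he := bps_run_end_unique hre hrun
        subst he
        exact bps_ge_refl _
    · rw [if_neg hb]
      refine ⟨hacc, bps_ge_refl acc, ?_⟩
      intro e hre
      have he := bps_run_end_unique hre hrun
      rw [he]
      cases acc with
      | none => exact absurd rfl hb
      | some p =>
        obtain ⟨bs, be⟩ := p
        simp only [bps_better, decide_eq_true_eq, Bool.or_eq_true, Bool.and_eq_true, not_or, not_and] at hb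
        obtain ⟨h1, h2⟩ := hb
        have hle2 : bps_walk S c S.length - c ≤ be - bs := by omega
        change bps_walk S c S.length - c < be - bs ∨
          (bps_walk S c S.length - c = be - bs ∧ bs ≤ c)
        rcases lt_or_eq_of_le hle2 with h | h
        · exact Or.inl h
        · have := h2 h
          exact Or.inr ⟨h, by omega⟩

lemma bps_B_fold (S : List Int) :
    ∀ (l : List Int) (acc : Option (Int × Int)),
      (∀ x ∈ l, x ∈ S) → bps_optrun S acc →
      bps_optrun S (l.foldl (bps_bstep S) acc) ∧
      bps_ge (l.foldl (bps_bstep S) acc) acc ∧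
      (∀ c ∈ l, ∀ e, bps_IsRun (· ∈ S) c e → bps_ge (l.foldl (bps_bstep S) acc) (some (c, e))) := by
  intro l
  induction l with
  | nil =>
    intro acc _ hacc
    exact ⟨hacc, bps_ge_refl acc, fun c hc => absurd hc (List.not_mem_nil)⟩
  | cons c t ih =>
    intro acc hl hacc
    have hc : c ∈ S := hl c (List.mem_cons_self)
    have hstep := bps_bstep_spec S acc c hc hacc
    have hrec := ih (bps_bstep S acc c) (fun x hx => hl x (List.mem_cons_of_mem _ hx)) hstep.1
    rw [List.foldl_cons]
    refine ⟨hrec.1, bps_ge_trans hrec.2.1 hstep.2.1, ?_⟩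
    intro c' hc' e hre
    rcases List.mem_cons.1 hc' with rfl | hc'
    · exact bps_ge_trans hrec.2.1 (hstep.2.2 e hre)
    · exact hrec.2.2 c' hc' e hre

-- ---- A side: invariant of the fused sorted fold ----

def bps_inv (P : Int → Prop) (rem : List Int) (b : Int × Int) (cs ce : Int) : Prop :=
  rem.Pairwise (· < ·) ∧ (∀ m ∈ rem, ce < m) ∧ (∀ m, ce < m → (P m ↔ m ∈ rem)) ∧
  cs ≤ ce ∧ (∀ m, cs ≤ m → m ≤ ce → P m) ∧ ¬ P (cs - 1) ∧
  ((b = (cs, cs) ∧ ∀ s e, bps_IsRun P s e → cs ≤ e) ∨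
   (bps_IsRun P b.1 b.2 ∧ b.2 < cs ∧
     ∀ s e, bps_IsRun P s e → e < cs → (e - s < b.2 - b.1 ∨ (e - s = b.2 - b.1 ∧ b.1 ≤ s))))

lemma bps_A_fold {P : Int → Prop} :
    ∀ (rem : List Int) (b : Int × Int) (cs ce : Int), bps_inv P rem b cs ce →
      bps_BestRun P (bps_afinal (rem.foldl bps_astep (b, cs, ce))).1
                    (bps_afinal (rem.foldl bps_astep (b, cs, ce))).2 := by
  intro rem
  induction rem with
  | nil =>
    intro b cs ce hinv
    obtain ⟨-, -, hcov, hle, hblk, hcsl, hbr⟩ := hinv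
    have hcer : ¬ P (ce + 1) := fun h => by
      have := (hcov (ce + 1) (by omega)).1 h
      simp at this
    have hcur : bps_IsRun P cs ce := ⟨hle, hblk, hcsl, hcer⟩
    have hruns : ∀ s e, bps_IsRun P s e → e ≤ ce := by
      intro s e hr
      by_contra h
      have hPe : P e := hr.2.1 e hr.1 (le_refl e)
      have := (hcov e (by omega)).1 hPe
      simp at this
    rw [List.foldl_nil]
    rcases hbr with ⟨hb, hnone⟩ | ⟨hbrun, hblt, hmax⟩
    · subst hb
      unfold bps_afinal
      dsimp only
      split_ifs with hgt
      · refine ⟨hcur, ?_⟩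
        intro s e hr
        have h1 := hruns s e hr
        have h2 := hnone s e hr
        have h3 := bps_run_block hblk hcsl hcer hr h2 h1
        omega
      · have hce : ce = cs := by omega
        subst hce
        refine ⟨hcur, ?_⟩
        intro s e hr
        have h1 := hruns s e hr
        have h2 := hnone s e hr
        have h3 := bps_run_block hblk hcsl hcer hr h2 h1
        omega
    · unfold bps_afinal
      simp only
      split_ifs with hgt
      · refine ⟨hcur, ?_⟩
        intro s e hr
        have h1 := hruns s e hr
        by_cases h2 : e < cs
        · have := hmax s e hr h2
          omega
        · have h3 := bps_run_block hblk hcsl hcer hr (by omega) h1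
          omega
      · refine ⟨hbrun, ?_⟩
        intro s e hr
        have h1 := hruns s e hr
        by_cases h2 : e < cs
        · exact hmax s e hr h2
        · have h3 := bps_run_block hblk hcsl hcer hr (by omega) h1
          have h4 := hbrun.1
          omega
  | cons cal rem' ih =>
    intro b cs ce hinv
    obtain ⟨hpw, hgt, hcov, hle, hblk, hcsl, hbr⟩ := hinv
    have hcal : ce < cal := hgt cal (List.mem_cons_self)
    have hpw' : rem'.Pairwise (· < ·) := List.Pairwise.of_cons hpw
    have hgt' : ∀ m ∈ rem', cal < m := fun m hm => (List.pairwise_cons.1 hpw).1 m hm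
    have hcov' : ∀ m, cal < m → (P m ↔ m ∈ rem') := by
      intro m hm
      rw [hcov m (by omega), List.mem_cons]
      constructor
      · rintro (rfl | h)
        · omega
        · exact h
      · exact fun h => Or.inr h
    rw [List.foldl_cons]
    by_cases hc : cal = ce + 1
    · have hstep : bps_astep (b, cs, ce) cal = (b, cs, cal) := by
        unfold bps_astep
        dsimp only
        rw [if_pos hc]
      rw [hstep]
      apply ih
      refine ⟨hpw', hgt', hcov', by omega, ?_, hcsl, ?_⟩
      · intro m h1 h2
        by_cases h3 : m ≤ ce
        · exact hblk m h1 h3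
        · have hm : m = cal := by omega
          rw [hm]
          exact (hcov cal (by omega)).2 List.mem_cons_self
      · rcases hbr with ⟨hb, hnone⟩ | ⟨hbrun, hblt, hmax⟩
        · exact Or.inl ⟨hb, hnone⟩
        · exact Or.inr ⟨hbrun, hblt, hmax⟩
    · have hcal2 : ce + 2 ≤ cal := by omega
      have hPcal : P cal := (hcov cal (by omega)).2 (List.mem_cons_self)
      have hnotmem : ∀ m, ce < m → m < cal → ¬ P m := by
        intro m h1 h2 hP
        have := (hcov m h1).1 hP
        rcases List.mem_cons.1 this with h' | h'
        · omega
        · exact absurd (hgt' _ h') (by omega)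
      have hcer : ¬ P (ce + 1) := hnotmem (ce + 1) (by omega) (by omega)
      have hcur : bps_IsRun P cs ce := ⟨hle, hblk, hcsl, hcer⟩
      have hcalm : ¬ P (cal - 1) := hnotmem (cal - 1) (by omega) (by omega)
      have hrunsle : ∀ s e, bps_IsRun P s e → e < cal → e ≤ ce := by
        intro s e hr hlt
        by_contra h
        exact hnotmem e (by omega) hlt (hr.2.1 e hr.1 (le_refl e))
      have hstep : bps_astep (b, cs, ce) cal =
          ((if ce - cs > b.2 - b.1 then (cs, ce) else b), cal, cal) := by
        unfold bps_astep
        dsimp only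
        rw [if_neg hc]
        split_ifs <;> rfl
      rw [hstep]
      apply ih
      refine ⟨hpw', hgt', hcov', le_refl cal, ?_, hcalm, ?_⟩
      · intro m h1 h2
        have : m = cal := by omega
        subst this
        exact hPcal
      · rcases hbr with ⟨hb, hnone⟩ | ⟨hbrun, hblt, hmax⟩
        · have hb' : (if ce - cs > b.2 - b.1 then (cs, ce) else b) = (cs, ce) := by
            subst hb
            dsimp only
            split_ifs with h
            · rfl
            · have : ce = cs := by omega
              rw [this]
          rw [hb']
          refine Or.inr ⟨hcur, by omega, ?_⟩
          intro s e hr hlt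
          have h1 := hrunsle s e hr hlt
          have h2 := hnone s e hr
          have h3 := bps_run_block hblk hcsl hcer hr h2 h1
          omega
        · refine Or.inr ?_
          split_ifs with h
          · refine ⟨hcur, by omega, ?_⟩
            intro s e hr hlt
            have h1 := hrunsle s e hr hlt
            by_cases h2 : e < cs
            · have := hmax s e hr h2
              omega
            · have h3 := bps_run_block hblk hcsl hcer hr (by omega) h1
              omega
          · refine ⟨hbrun, by omega, ?_⟩
            intro s e hr hlt
            have h1 := hrunsle s e hr hlt
            by_cases h2 : e < cs
            · exact hmax s e hr h2
            · have h3 := bps_run_block hblk hcsl hcer hr (by omega) h1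
              have h4 := hbrun.1
              omega

-- ---- assembly ----

theorem bps_main (scores : List (Int × List (Int × Int))) (burst_len : Int) :
    best_perfect_span scores burst_len = best_perfect_span_alt scores burst_len := by
  unfold best_perfect_span best_perfect_span_alt
  dsimp only
  set K := ((PySem.Dict.ofList scores).items.filter (fun p => p.2.any (fun s => s.1 == burst_len))).map (fun p => p.1) with hKdef
  set L := PySem.List.sorted K (fun x => x) false with hLdef
  set S := PySem.Set.ofList K with hSdef
  have hKnd : K.Nodup := by
    have h1 := PySem.Dict.nodup_keys_ofList (ps := scores)
    simp only [PySem.Dict.keys] at h1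
    have h2 : K.Sublist ((PySem.Dict.ofList scores).items.map (fun p => p.1)) := by
      rw [hKdef]
      exact List.Sublist.map _ List.filter_sublist
    exact h1.sublist h2
  have hperm : L.Perm K := by
    rw [hLdef]
    exact PySem.List.sorted_perm K (fun x => x) false
  have hmemL : ∀ m : Int, m ∈ L ↔ m ∈ K := fun m => hperm.mem_iff
  have hmemS : ∀ m : Int, m ∈ S ↔ m ∈ K := fun m => by
    rw [hSdef]
    exact PySem.Set.mem_ofList K m
  have hPQ : ∀ m : Int, (m ∈ L) ↔ (m ∈ S) := fun m => (hmemL m).trans (hmemS m).symm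
  have hLnd : L.Nodup := (hperm.nodup_iff).mpr hKnd
  have hle : L.Pairwise (fun a b => a ≤ b) := by
    rw [hLdef]
    have := PySem.List.sorted_pairwise (xs := K) (key := fun x => x)
    simpa using this
  have hlt : L.Pairwise (fun a b => a < b) :=
    (hle.and hLnd).imp (fun hab => lt_of_le_of_ne hab.1 hab.2)
  rcases hLx : L with _ | ⟨p0, rest⟩
  · have hK0 : K = [] := by
      cases hKc : K with
      | nil => rfl
      | cons a t =>
        have := (hmemL a).2 (by rw [hKc]; exact List.mem_cons_self)
        rw [hLx] at this
        cases this
    have hS0 : S = ([] : List Int) := by rw [hSdef, hK0]; rfl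
    rw [hS0]
    rfl
  · rw [hLx] at hlt
    have hgt0 : ∀ m ∈ rest, p0 < m := (List.pairwise_cons.1 hlt).1
    have hinv : bps_inv (· ∈ L) rest (p0, p0) p0 p0 := by
      refine ⟨List.Pairwise.of_cons hlt, hgt0, ?_, le_refl p0, ?_, ?_, ?_⟩
      · intro m hm
        show m ∈ L ↔ m ∈ rest
        rw [hLx, List.mem_cons]
        constructor
        · rintro (h | h)
          · omega
          · exact h
        · exact fun h => Or.inr h
      · intro m h1 h2
        have hm : m = p0 := le_antisymm h2 h1
        show m ∈ L
        rw [hm, hLx]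
        exact List.mem_cons_self
      · intro hmem
        have hmem2 : p0 - 1 ∈ L := hmem
        rw [hLx, List.mem_cons] at hmem2
        rcases hmem2 with h | h
        · omega
        · exact absurd (hgt0 _ h) (by omega)
      · left
        refine ⟨rfl, ?_⟩
        intro s e hr
        have hPe : e ∈ L := hr.2.1 e hr.1 (le_refl e)
        rw [hLx, List.mem_cons] at hPe
        rcases hPe with h | h
        · omega
        · have := hgt0 _ h
          omega
    have hA := bps_A_fold (P := (· ∈ L)) rest (p0, p0) p0 p0 hinv
    have hBf := bps_B_fold S S none (fun x h => h) trivial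
    have hp0S : p0 ∈ S := (hmemS p0).2 ((hmemL p0).1 (by rw [hLx]; exact List.mem_cons_self))
    have hp0m : (p0 - 1) ∉ S := by
      intro h
      have hm := (hmemL (p0 - 1)).2 ((hmemS _).1 h)
      rw [hLx, List.mem_cons] at hm
      rcases hm with h' | h'
      · omega
      · exact absurd (hgt0 _ h') (by omega)
    have hw := bps_walk_spec S.length S p0 hp0S List.countP_le_length
    have hrun0 : bps_IsRun (· ∈ S) p0 (bps_walk S p0 S.length) := ⟨hw.1, hw.2.1, hp0m, hw.2.2⟩
    have hge0 := hBf.2.2 p0 hp0S _ hrun0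
    cases hr : S.foldl (bps_bstep S) none with
    | none =>
      rw [hr] at hge0
      exact hge0.elim
    | some q =>
      obtain ⟨bs, be⟩ := q
      have hrB : bps_IsRun (· ∈ S) bs be := by
        have h := hBf.1
        rw [hr] at h
        exact h
      have hmaxB : ∀ s e, bps_IsRun (· ∈ S) s e →
          (e - s < be - bs ∨ (e - s = be - bs ∧ bs ≤ s)) := by
        intro s e hre
        have hsS : s ∈ S := hre.2.1 s (le_refl s) hre.1
        have h := hBf.2.2 s hsS e hre
        rw [hr] at h
        exact h
      have hB : bps_BestRun (· ∈ S) bs be := ⟨hrB, hmaxB⟩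
      have hA' := (bps_BestRun_congr hPQ).1 hA
      obtain ⟨h1, h2⟩ := bps_BestRun_unique hA' hB
      dsimp only
      rw [h1, h2]

-- ===== VERDICT (by name: the statement is the Claim_ definition above) =====
theorem best_perfect_span_spec : Claim_equal_best_perfect_span := by
  intro scores burst_len _hdom
  show best_perfect_span scores burst_len = best_perfect_span_alt scores burst_len
  exact bps_main scores burst_len
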